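-- pv_equiv track=rewrite | github.com/Po33ski/AZDsupport | backend/workflow.py | _strip_json_prefix
-- ===== SOURCE A (Python) =====
-- def _strip_json_prefix(text: str) -> str:
--     text = text.strip()
--     if not text.startswith("{"):
--         return text
--     depth = 0
--     in_string = False
--     escape = False
--     for i, ch in enumerate(text):
--         if escape:
--             escape = False
--             continue
--         if ch == "\\" and in_string:
--             escape = True
--             continue
--         if ch == '"':
--             in_string = not in_string
--             continue
--         if in_string:
--             continue
--         if ch == "{":
--             depth += 1
--         elif ch == "}":
--             depth -= 1
--             if depth == 0:
--                 return text[i + 1:].strip()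
--     return text
-- ===== SOURCE B (Python) =====
-- def _skip_string(text, i):
--     """i points just past an opening quote; return index just past the closing quote, or None."""
--     n = len(text)
--     while i < n:
--         c = text[i]
--         if c == "\\":
--             i += 2
--         elif c == '"':
--             return i + 1
--         else:
--             i += 1
--     return None
--
--
-- def _skip_body(text, i):
--     """i points just past a '{'; recursively skip the object body, returning the index
--     just past the matching '}', or None if the braces never balance."""
--     n = len(text)
--     while i < n:
--         c = text[i]
--         if c == "{":
--             j = _skip_body(text, i + 1)
--             if j is None:
--                 return None
--             i = j
--         elif c == "}":
--             return i + 1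
--         elif c == '"':
--             j = _skip_string(text, i + 1)
--             if j is None:
--                 return None
--             i = j
--         else:
--             i += 1
--     return None
--
--
-- def _strip_json_prefix(text: str) -> str:
--     text = text.strip()
--     if not text.startswith("{"):
--         return text
--     end = _skip_body(text, 1)
--     if end is None:
--         return text
--     return text[end:].strip()
-- ===== Notes on version B (the rewrite author's own statement) =====
-- stated objective: alternative
-- what changed: Replaced A's flat single-pass state machine over (depth, in_string, escape) flags by a recursive-descent skipper: a recursive _skip_body that calls itself for each nested opening brace (recursion depth replaces the integer depth counter) and a separate _skip_string helper, the resulting end index used once at the top level.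
import Mathlib
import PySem

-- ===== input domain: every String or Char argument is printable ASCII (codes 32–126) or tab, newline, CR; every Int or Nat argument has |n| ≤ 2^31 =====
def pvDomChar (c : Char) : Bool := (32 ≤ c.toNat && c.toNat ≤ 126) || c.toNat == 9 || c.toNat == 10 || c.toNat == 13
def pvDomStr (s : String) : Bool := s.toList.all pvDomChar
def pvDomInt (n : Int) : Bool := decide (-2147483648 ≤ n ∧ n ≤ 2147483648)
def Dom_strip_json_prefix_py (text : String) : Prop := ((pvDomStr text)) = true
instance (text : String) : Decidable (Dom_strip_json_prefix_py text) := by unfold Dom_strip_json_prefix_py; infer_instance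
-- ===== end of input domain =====

-- B replaces A's flat per-character state machine (depth/in_string/escape flags) by a
-- recursive-descent skipper: recursion depth replaces the integer counter (objective: alternative).

-- ===== PORT A =====
-- A's for-loop over the characters as a structural recursion carrying A's state
-- (in_string, escape, depth); 'text[i+1:]' at index i is exactly the remaining suffix 'rest'.
def aLoop (orig : List Char) : List Char → Int → Bool → Bool → List Char
  | [], _, _, _ => orig
  | ch :: rest, depth, instr, esc =>
    if esc then aLoop orig rest depth instr false
    else if ch = '\\' ∧ instr then aLoop orig rest depth instr true
    else if ch = '"' then aLoop orig rest depth (!instr) esc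
    else if instr then aLoop orig rest depth instr esc
    else if ch = '{' then aLoop orig rest (depth + 1) instr esc
    else if ch = '}' then
      if depth - 1 = 0 then PySem.Chars.strip rest
      else aLoop orig rest (depth - 1) instr esc
    else aLoop orig rest depth instr esc

def strip_json_prefix_py (text : String) : String :=
  let t := PySem.Chars.strip text.toList
  if !(PySem.Chars.startswith t ['{']) then String.ofList t
  else String.ofList (aLoop t t 0 false false)

-- ===== PORT B =====
-- B's _skip_string: having consumed an opening '"', advance past the string body
-- (jumping two characters after a backslash) until the closing '"' is consumed.
-- 'index just past the closing quote' is represented as the remaining suffix;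
-- strict length decrease carried in the subtype for the caller's termination.
def skipString : (l : List Char) → Option {l' : List Char // l'.length < l.length}
  | [] => none
  | c :: rest =>
    if c = '\\' then
      match skipString rest.tail with
      | none => none
      | some ⟨l', h⟩ =>
        some ⟨l', by have := List.length_tail (l := rest); simp only [List.length_cons]; omega⟩
    else if c = '"' then some ⟨rest, by simp⟩
    else
      match skipString rest with
      | none => none
      | some ⟨l', h⟩ => some ⟨l', by simp only [List.length_cons]; omega⟩
  termination_by l => l.length
  decreasing_by
    · have := List.length_tail (l := rest); simp only [List.length_cons]; omega
    · simp

-- B's _skip_body: called just past a '{'; recursively skips the object body and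
-- returns the suffix just past the matching '}' (none if braces never balance).
def skipBody : (l : List Char) → Option {l' : List Char // l'.length < l.length}
  | [] => none
  | c :: rest =>
    if c = '{' then
      match skipBody rest with
      | none => none
      | some ⟨l', h⟩ =>
        match skipBody l' with
        | none => none
        | some ⟨l'', h'⟩ => some ⟨l'', by simp only [List.length_cons]; omega⟩
    else if c = '}' then some ⟨rest, by simp⟩
    else if c = '"' then
      match skipString rest with
      | none => none
      | some ⟨l', h⟩ =>
        match skipBody l' with
        | none => none
        | some ⟨l'', h'⟩ => some ⟨l'', by simp only [List.length_cons]; omega⟩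
    else
      match skipBody rest with
      | none => none
      | some ⟨l', h⟩ => some ⟨l', by simp only [List.length_cons]; omega⟩
  termination_by l => l.length
  decreasing_by
    · simp
    · simp only [List.length_cons]; omega
    · simp only [List.length_cons]; omega
    · simp

def strip_json_prefix_py_alt (text : String) : String :=
  let t := PySem.Chars.strip text.toList
  if !(PySem.Chars.startswith t ['{']) then String.ofList t
  else
    match skipBody t.tail with
    | some ⟨l', _⟩ => String.ofList (PySem.Chars.strip l')
    | none => String.ofList t

-- ===== PRECONDITION & SPEC =====
def Spec_strip_json_prefix_py (text : String) (out : String) : Prop := out = strip_json_prefix_py_alt text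
instance (text : String) (out : String) : Decidable (Spec_strip_json_prefix_py text out) := by unfold Spec_strip_json_prefix_py; infer_instance

-- ===== CLAIM =====
def Claim_equal_strip_json_prefix_py : Prop := ∀ (text : String), Dom_strip_json_prefix_py text → Spec_strip_json_prefix_py text (strip_json_prefix_py text)

-- ===== LEMMAS AND PROOFS =====

-- Inside a string (escape clear), A's continued scan equals B's skipString followed
-- by A resumed outside the string (orig if the string never closes).
theorem string_eq (orig : List Char) :
    ∀ (n : Nat) (l : List Char), l.length ≤ n → ∀ (depth : Int),
      aLoop orig l depth true false =
        (match skipString l with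
         | none => orig
         | some l' => aLoop orig l'.val depth false false) := by
  intro n
  induction n with
  | zero =>
    intro l hl depth
    have : l = [] := List.eq_nil_of_length_eq_zero (Nat.le_zero.mp hl)
    subst this; simp [aLoop, skipString]
  | succ n ih =>
    intro l hl depth
    cases l with
    | nil => simp [aLoop, skipString]
    | cons c rest =>
      simp only [List.length_cons, Nat.succ_le_succ_iff] at hl
      by_cases hb : c = '\\'
      · subst hb
        cases rest with
        | nil => simp [aLoop, skipString]
        | cons c' rest' =>
          have h1 : aLoop orig ('\\' :: c' :: rest') depth true false
              = aLoop orig rest' depth true false := by simp [aLoop]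
          rw [h1, ih rest' (by simp at hl; omega) depth]
          simp only [skipString, List.tail_cons]
          cases hss : skipString rest' with
          | none => simp
          | some l' => obtain ⟨v, hv⟩ := l'; simp
      · by_cases hq : c = '"'
        · subst hq
          have h1 : aLoop orig ('"' :: rest) depth true false
              = aLoop orig rest depth false false := by simp [aLoop]
          rw [h1]; simp [skipString]
        · have h1 : aLoop orig (c :: rest) depth true false
              = aLoop orig rest depth true false := by simp [aLoop, hb, hq]
          rw [h1, ih rest hl depth]
          simp only [skipString, hb, hq, if_false]
          cases skipString rest <;> simp
      
-- Outside a string at depth d ≥ 1, A's scan equals B's skipBody: A returns the stripped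
-- suffix exactly when skipBody closes the last open brace, and falls through together.
theorem body_eq (orig : List Char) :
    ∀ (n : Nat) (l : List Char), l.length ≤ n → ∀ (depth : Int), 1 ≤ depth →
      aLoop orig l depth false false =
        (match skipBody l with
         | none => orig
         | some l' =>
             if depth = 1 then PySem.Chars.strip l'.val
             else aLoop orig l'.val (depth - 1) false false) := by
  intro n
  induction n with
  | zero =>
    intro l hl depth hd
    have : l = [] := List.eq_nil_of_length_eq_zero (Nat.le_zero.mp hl)
    subst this; simp [aLoop, skipBody]
  | succ n ih =>
    intro l hl depth hd
    cases l with
    | nil => simp [aLoop, skipBody]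
    | cons c rest =>
      simp only [List.length_cons, Nat.succ_le_succ_iff] at hl
      by_cases ho : c = '{'
      · subst ho
        have h1 : aLoop orig ('{' :: rest) depth false false
            = aLoop orig rest (depth + 1) false false := by simp [aLoop]
        rw [h1, ih rest hl (depth + 1) (by omega)]
        simp only [skipBody]
        cases hsb : skipBody rest with
        | none => simp
        | some l' =>
          have : depth + 1 ≠ 1 := by omega
          simp only [this, if_false, add_sub_cancel_right]
          rw [ih l'.val (by have := l'.property; omega) depth hd]
          cases skipBody l'.val <;> simp
      · by_cases hc : c = '}'
        · subst hc
          by_cases h1 : depth = 1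
          · subst h1; simp [aLoop, skipBody]
          · have ha : aLoop orig ('}' :: rest) depth false false
                = aLoop orig rest (depth - 1) false false := by
              simp [aLoop]; intro h; omega
            rw [ha]; simp [skipBody, h1]
        · by_cases hq : c = '"'
          · subst hq
            have h1 : aLoop orig ('"' :: rest) depth false false
                = aLoop orig rest depth true false := by simp [aLoop]
            rw [h1, string_eq orig rest.length rest (le_refl _) depth]
            simp only [skipBody, ho, hc, if_false]
            cases hss : skipString rest with
            | none => simp
            | some l' =>
              simp only
              rw [ih l'.val (by have := l'.property; omega) depth hd]
              cases skipBody l'.val <;> simp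
          · have h1 : aLoop orig (c :: rest) depth false false
                = aLoop orig rest depth false false := by simp [aLoop, hq, ho, hc]
            rw [h1, ih rest hl depth hd]
            simp only [skipBody, ho, hc, hq, if_false]
            cases skipBody rest <;> simp

-- ===== VERDICT =====
theorem strip_json_prefix_py_spec : Claim_equal_strip_json_prefix_py := by
  intro text _
  unfold Spec_strip_json_prefix_py strip_json_prefix_py strip_json_prefix_py_alt
  set t := PySem.Chars.strip text.toList with ht
  by_cases h : PySem.Chars.startswith t ['{'] = true
  · simp only [h, Bool.not_true, Bool.false_eq_true, if_false]
    obtain ⟨rest, hrest⟩ : ∃ rest, t = '{' :: rest := by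
      have := (PySem.Chars.startswith_iff t ['{']).mp h
      rcases this with ⟨s, hs⟩
      exact ⟨s, hs.symm⟩
    rw [hrest]
    have h1 : aLoop ('{' :: rest) ('{' :: rest) 0 false false
        = aLoop ('{' :: rest) rest 1 false false := by simp [aLoop]
    rw [h1, body_eq ('{' :: rest) rest.length rest (le_refl _) 1 (le_refl _)]
    simp only [List.tail_cons]
    cases skipBody rest <;> simp
  · simp [h]
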